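-- pv_equiv track=rewrite | github.com/Behrouz-Babaki/CP4BN | utils_master/PostProcess/readLikelyBin.py | bitSlices
-- ===== SOURCE A (Python) =====
-- def bitSlices(bl,nv):
--     res = []
--     byteList = []
--     for b in bl:
--         byteList += b
--     end = len(byteList)
--     for i in reversed(nv):
--         start = end - i;
--         res.append(byteList[start:end])
--         end = start
--     return [r for r in reversed(res)]
-- ===== SOURCE B (Python) =====
-- from itertools import chain, accumulate
--
-- def bitSlices(bl, nv):
--     byteList = list(chain.from_iterable(bl))
--     base = len(byteList) - sum(nv)
--     bounds = list(accumulate(nv, initial=base))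
--     return [byteList[lo:hi] for lo, hi in zip(bounds, bounds[1:])]
-- ===== Notes on version B (the rewrite author's own statement) =====
-- stated objective: simpler
-- what changed: Replaces the backward loop with mutable end/start state and a final reversal by a forward pass: flatten, compute the cut boundaries as a prefix-sum table starting at len-sum(nv), and slice each consecutive boundary pair directly.
import Mathlib
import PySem

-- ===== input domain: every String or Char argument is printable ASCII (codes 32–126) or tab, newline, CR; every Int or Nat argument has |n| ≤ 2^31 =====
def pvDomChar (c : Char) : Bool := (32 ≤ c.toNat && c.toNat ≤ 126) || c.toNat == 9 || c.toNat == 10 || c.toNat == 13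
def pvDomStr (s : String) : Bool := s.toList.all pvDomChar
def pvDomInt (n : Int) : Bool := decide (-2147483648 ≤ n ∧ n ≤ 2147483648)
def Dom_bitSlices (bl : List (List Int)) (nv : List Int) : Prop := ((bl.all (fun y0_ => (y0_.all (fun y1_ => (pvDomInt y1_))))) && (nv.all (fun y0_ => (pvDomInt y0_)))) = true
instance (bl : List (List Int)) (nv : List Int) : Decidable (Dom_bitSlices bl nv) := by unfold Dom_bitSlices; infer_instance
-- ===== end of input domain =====

-- B replaces the backward loop (mutable end, append, final reversal) by a forward pass
-- over a prefix-sum boundary table; same output, same cost (objective: simpler).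

-- ===== PORT A =====
-- backward loop: state (end, res); for i in reversed(nv): start = end - i; res.append(byteList[start:end]); end = start
def bitSlicesLoopA (byteList : List Int) : List Int → Int × List (List Int) → Int × List (List Int)
  | [], st => st
  | i :: t, st =>
    let start := st.1 - i
    bitSlicesLoopA byteList t (start, st.2 ++ [PySem.List.slice byteList (some start) (some st.1)])

def bitSlices (bl : List (List Int)) (nv : List Int) : List (List Int) :=
  let byteList := bl.foldl (fun acc b => acc ++ b) []
  let res := (bitSlicesLoopA byteList nv.reverse ((byteList.length : Int), [])).2
  res.reverse

-- ===== PORT B =====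
def bitSlices_alt (bl : List (List Int)) (nv : List Int) : List (List Int) :=
  let byteList := bl.flatten
  let base := (byteList.length : Int) - nv.sum
  let bounds := nv.scanl (· + ·) base
  (bounds.zip bounds.tail).map (fun p => PySem.List.slice byteList (some p.1) (some p.2))

-- ===== PRECONDITION & SPEC =====
def Spec_bitSlices (bl : List (List Int)) (nv : List Int) (out : List (List Int)) : Prop := out = bitSlices_alt bl nv
instance (bl : List (List Int)) (nv : List Int) (out : List (List Int)) : Decidable (Spec_bitSlices bl nv out) := by unfold Spec_bitSlices; infer_instance

-- ===== CLAIM =====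
def Claim_equal_bitSlices : Prop := ∀ (bl : List (List Int)) (nv : List Int), Dom_bitSlices bl nv → Spec_bitSlices bl nv (bitSlices bl nv)

-- ===== LEMMAS AND PROOFS =====

-- the A loop appends onto its accumulator
theorem loopA_acc (byteList : List Int) (l : List Int) (e : Int) (acc : List (List Int)) :
    (bitSlicesLoopA byteList l (e, acc)).2
      = acc ++ (bitSlicesLoopA byteList l (e, [])).2 := by
  induction l generalizing e acc with
  | nil => simp [bitSlicesLoopA]
  | cons i t ih =>
    simp only [bitSlicesLoopA, List.nil_append]
    rw [ih, ih (acc := [_])]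
    simp

theorem loopA_append (byteList : List Int) (xs ys : List Int) (e : Int) :
    (bitSlicesLoopA byteList (xs ++ ys) (e, [])).2
      = (bitSlicesLoopA byteList xs (e, [])).2
        ++ (bitSlicesLoopA byteList ys (e - xs.sum, [])).2 := by
  induction xs generalizing e with
  | nil => simp [bitSlicesLoopA]
  | cons i t ih =>
    simp only [List.cons_append, bitSlicesLoopA, List.nil_append]
    rw [loopA_acc, ih, loopA_acc byteList t (e - i) [_]]
    simp only [List.sum_cons]
    rw [show e - i - t.sum = e - (i + t.sum) by ring]
    simp

-- B's forward pass, written as a recursion on (base, nv)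
def bSlices (byteList : List Int) : Int → List Int → List (List Int)
  | _, [] => []
  | b, i :: t => PySem.List.slice byteList (some b) (some (b + i)) :: bSlices byteList (b + i) t

theorem zip_scanl_eq_bSlices (byteList : List Int) (nv : List Int) (b : Int) :
    (((nv.scanl (· + ·) b).zip (nv.scanl (· + ·) b).tail).map
        (fun p => PySem.List.slice byteList (some p.1) (some p.2)))
      = bSlices byteList b nv := by
  induction nv generalizing b with
  | nil => simp [List.scanl_nil, bSlices]
  | cons i t ih =>
    cases t with
    | nil => simp [List.scanl_cons, List.scanl_nil, bSlices]
    | cons j u =>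
      have h := ih (b + i)
      rw [List.scanl_cons] at h
      rw [List.scanl_cons, List.scanl_cons]
      simp only [List.tail_cons, List.zip_cons_cons, List.map_cons] at h ⊢
      simp [bSlices, h]

theorem loopA_reverse_eq (byteList : List Int) (nv : List Int) (e : Int) :
    ((bitSlicesLoopA byteList nv.reverse (e, [])).2).reverse
      = bSlices byteList (e - nv.sum) nv := by
  induction nv generalizing e with
  | nil => simp [bitSlicesLoopA, bSlices]
  | cons i t ih =>
    have : (i :: t).reverse = t.reverse ++ [i] := by simp
    rw [this, loopA_append]
    simp only [bitSlicesLoopA, List.sum_reverse, List.sum_cons]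
    rw [List.reverse_append, ih]
    simp only [bSlices, List.reverse_cons, List.reverse_nil, List.nil_append]
    rw [show e - t.sum - i = e - (i + t.sum) by ring,
        show e - t.sum = e - (i + t.sum) + i by ring]
    rfl

theorem foldl_append_eq_flatten (bl : List (List Int)) (acc : List Int) :
    bl.foldl (fun acc b => acc ++ b) acc = acc ++ bl.flatten := by
  induction bl generalizing acc with
  | nil => simp
  | cons b t ih => simp [List.foldl, ih]

-- ===== VERDICT =====
theorem bitSlices_spec : Claim_equal_bitSlices := by
  intro bl nv _
  unfold Spec_bitSlices bitSlices bitSlices_alt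
  simp only [foldl_append_eq_flatten, List.nil_append]
  rw [loopA_reverse_eq, zip_scanl_eq_bSlices]
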